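-- pv_equiv track=rewrite | github.com/GrapesGoober/simplic-py | aofs/assembler.py | parse_instr
-- ===== SOURCE A (Python) =====
-- instructions = {
--     "condition" : [ "move", "cadd" ],
--     "memory" : [ "load", "store" ],
--     "insert" : [ "insert" ],
--     "shift" : [ "shift" ],
--     "alu" : [
--         "add", "sub", "mul", "longmul", "div", "mod",
--         "and", "or", "xor", "nor"
--     ]
-- }
--
-- def parse_instr(token : str) -> (int, str):
--
--     instr_index = 0
--     for instr_type in instructions:
--         if token.lower() in instructions[instr_type]:
--             instr_index += instructions[instr_type].index(token.lower())
--             return instr_index, instr_type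
--         else:
--             instr_index += len(instructions[instr_type])
--
--     # If did not return within loop, then assume it wasn't found
--     raise Exception(f"Unrecognized instruction '{token}'")
-- ===== SOURCE B (Python) =====
-- instructions = {
--     "condition" : [ "move", "cadd" ],
--     "memory" : [ "load", "store" ],
--     "insert" : [ "insert" ],
--     "shift" : [ "shift" ],
--     "alu" : [
--         "add", "sub", "mul", "longmul", "div", "mod",
--         "and", "or", "xor", "nor"
--     ]
-- }
--
-- # Built once at module load: flatten the groups to (name, (global index, type))
-- # entries, then sort them by name so lookups can use binary search.
-- _entries = []
-- _i = 0
-- for _type, _names in instructions.items():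
--     for _name in _names:
--         _entries.append((_name, (_i, _type)))
--         _i += 1
-- _entries = sorted(_entries, key=lambda e: e[0])
--
-- def parse_instr(token : str) -> (int, str):
--     key = token.lower()
--     lo, hi = 0, len(_entries)
--     while lo < hi:
--         mid = (lo + hi) // 2
--         if _entries[mid][0] < key:
--             lo = mid + 1
--         else:
--             hi = mid
--     if lo < len(_entries) and _entries[lo][0] == key:
--         return _entries[lo][1]
--     raise Exception(f"Unrecognized instruction '{token}'")
-- ===== Notes on version B (the rewrite author's own statement) =====
-- stated objective: alternative
-- what changed: Replaced A's per-call sequential accumulation loop over the instruction groups with a name-sorted flattened table built once at module load, queried by binary search (lower-bound bisection) per call.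
import Mathlib
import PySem

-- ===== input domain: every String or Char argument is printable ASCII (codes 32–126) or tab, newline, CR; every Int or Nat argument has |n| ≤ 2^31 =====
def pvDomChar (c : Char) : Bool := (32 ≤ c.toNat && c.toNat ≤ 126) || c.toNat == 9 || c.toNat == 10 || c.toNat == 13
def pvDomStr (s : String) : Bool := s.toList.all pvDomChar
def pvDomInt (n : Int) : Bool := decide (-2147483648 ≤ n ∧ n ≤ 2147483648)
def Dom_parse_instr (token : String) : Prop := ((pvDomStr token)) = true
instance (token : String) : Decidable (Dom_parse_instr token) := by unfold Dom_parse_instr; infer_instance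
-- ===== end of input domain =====

-- B replaces A's per-call accumulation loop by a name-sorted flat table built once, queried by binary search.
-- Equivalence is about the RETURN value on recognized tokens; on unrecognized tokens both Pythons raise (excluded by Pre_).

-- ===== PORT A =====
-- the module-level `instructions` dict, in insertion order
def pvInstructions : List (String × List String) :=
  [("condition", ["move", "cadd"]),
   ("memory", ["load", "store"]),
   ("insert", ["insert"]),
   ("shift", ["shift"]),
   ("alu", ["add", "sub", "mul", "longmul", "div", "mod", "and", "or", "xor", "nor"])]

-- the for-loop over instruction types, carrying instr_index; `none` = the final raise
def pvParseLoop (low : String) (instr_index : Int) : List (String × List String) → Option (Int × String)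
  | [] => none
  | (instr_type, names) :: rest =>
      if low ∈ names then
        match PySem.List.index? names low with
        | some j => some (instr_index + j, instr_type)
        | none => none      -- unreachable: membership holds
      else
        pvParseLoop low (instr_index + names.length) rest

def parse_instr (token : String) : Int × String :=
  (pvParseLoop (PySem.Str.lower token) 0 pvInstructions).getD (0, "")   -- none = raise, excluded by Pre_

-- ===== PORT B =====
-- _entries: flatten the groups to (name, (global index, type)), then sort by name (built once at module load)
-- Python's `<` on strings (lexicographic by code point) is ported on the code-point list side
-- (`.toList`, Lean's List/Char order) — exact, since Char order is code-point order.
def pvEntries : List (String × (Int × String)) :=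
  PySem.List.sorted
    ((pvInstructions.foldl
      (fun (st : List (String × (Int × String)) × Int) (p : String × List String) =>
        p.2.foldl (fun st name => (st.1 ++ [(name, (st.2, p.1))], st.2 + 1)) st)
      ([], 0)).1)
    (fun e => e.1.toList)

-- the while loop `while lo < hi: …` (lower-bound bisection); fuel only makes the loop total
def pvBisect (es : List (String × (Int × String))) (key : String) : Nat → Nat → Nat → Nat
  | 0, lo, _ => lo
  | fuel + 1, lo, hi =>
      if lo < hi then
        let mid := (lo + hi) / 2
        if (es.getD mid ("", (0, ""))).1.toList < key.toList then
          pvBisect es key fuel (mid + 1) hi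
        else
          pvBisect es key fuel lo mid
      else lo

def parse_instr_alt (token : String) : Int × String :=
  let key := PySem.Str.lower token
  let lo := pvBisect pvEntries key pvEntries.length 0 pvEntries.length
  if lo < pvEntries.length ∧ (pvEntries.getD lo ("", (0, ""))).1 = key then
    (pvEntries.getD lo ("", (0, ""))).2
  else
    (0, "")   -- none = raise, excluded by Pre_

-- ===== PRECONDITION & SPEC =====
-- Pre_ excludes exactly the tokens whose lowercase form is not a known instruction: there A raises Exception (and B does too).
def Pre_parse_instr (token : String) : Prop :=
  PySem.Str.lower token ∈ ["move", "cadd", "load", "store", "insert", "shift",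
    "add", "sub", "mul", "longmul", "div", "mod", "and", "or", "xor", "nor"]
instance (token : String) : Decidable (Pre_parse_instr token) := by unfold Pre_parse_instr; infer_instance
def pvWitness_parse_instr : String := "longmul"

def Spec_parse_instr (token : String) (out : Int × String) : Prop := out = parse_instr_alt token
instance (token : String) (out : Int × String) : Decidable (Spec_parse_instr token out) := by unfold Spec_parse_instr; infer_instance

-- ===== CLAIM (what is proved, stated in full; the proofs are below) =====
def Claim_equal_parse_instr : Prop := ∀ (token : String), Dom_parse_instr token → Pre_parse_instr token → Spec_parse_instr token (parse_instr token)

-- ===== LEMMAS AND PROOFS =====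
theorem parse_eq_of_mem (s : String)
    (h : s ∈ ["move", "cadd", "load", "store", "insert", "shift",
      "add", "sub", "mul", "longmul", "div", "mod", "and", "or", "xor", "nor"]) :
    (pvParseLoop s 0 pvInstructions).getD (0, "") =
      (let lo := pvBisect pvEntries s pvEntries.length 0 pvEntries.length;
       if lo < pvEntries.length ∧ (pvEntries.getD lo ("", (0, ""))).1 = s then
         (pvEntries.getD lo ("", (0, ""))).2
       else (0, "")) := by
  fin_cases h <;> decide

-- ===== VERDICT (by name: the statement is the Claim_ definition above) =====
theorem parse_instr_spec : Claim_equal_parse_instr := by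
  intro token _ hPre
  unfold Spec_parse_instr parse_instr parse_instr_alt
  exact parse_eq_of_mem _ hPre
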